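-- pv_equiv track=rewrite | github.com/leandro-driguez/daa-problems | problems/the-bar/src/tester.py | check
-- ===== SOURCE A (Python) =====
-- from typing import List
--
-- def check(a: List[int], k: int) -> int:
--     N = len(a)
--
--     # precalculation of the array with the accumulated sum
--     accum_sum = [0 for _ in range(N+1)]
--     for i, item in enumerate(a):
--         accum_sum[i+1] = item + accum_sum[i]
--     # check if any subarray of size K, has non-positive sum
--     l = 0; r = k
--     while r <= N:
--         if accum_sum[r] - accum_sum[l] <= 0:
--             break
--         l += 1; r += 1
--     else:
--         return True
--
--     return False
-- ===== SOURCE B (Python) =====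
-- from typing import List
--
-- def check(a: List[int], k: int) -> int:
--     N = len(a)
--     if k > N:
--         return True
--     s = sum(a[:k])
--     if s <= 0:
--         return False
--     for r in range(k, N):
--         s += a[r] - a[r - k]
--         if s <= 0:
--             return False
--     return True
-- ===== Notes on version B (the rewrite author's own statement) =====
-- stated objective: simpler
-- what changed: Drops the O(N) prefix-sum array entirely: B keeps one running window sum, seeded with sum(a[:k]), and slides it with s += a[r] - a[r-k], returning False at the first non-positive window; no auxiliary list is allocated or written.
-- outside the precondition, e.g. on check([-2, 3, 4, 3], -2): A returns False, B raises IndexError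
import Mathlib
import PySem

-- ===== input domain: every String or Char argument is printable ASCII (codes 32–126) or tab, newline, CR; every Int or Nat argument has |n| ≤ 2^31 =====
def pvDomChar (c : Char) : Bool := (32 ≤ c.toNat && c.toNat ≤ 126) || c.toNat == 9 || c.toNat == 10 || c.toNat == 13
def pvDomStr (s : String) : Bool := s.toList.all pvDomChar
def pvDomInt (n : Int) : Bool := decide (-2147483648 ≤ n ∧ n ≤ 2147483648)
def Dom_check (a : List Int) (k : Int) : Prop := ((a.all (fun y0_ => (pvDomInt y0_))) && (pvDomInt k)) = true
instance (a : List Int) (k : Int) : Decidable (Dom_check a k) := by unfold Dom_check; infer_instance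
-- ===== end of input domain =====

-- B replaces A's prefix-sum array by a single running window sum (O(1) extra space); return-value equivalence only, no mutation involved.

-- ===== PORT A =====
-- the 'while r <= N' loop; fuel only makes it total (never exhausted on admitted inputs: the loop runs at most N-k+1 ≤ fuel-1 times)
def checkWhile (accum : List Int) (N : Int) : Int → Int → Nat → Bool
  | _, _, 0 => true
  | l, r, fuel + 1 =>
      if r ≤ N then
        if PySem.List.pyGetD accum r 0 - PySem.List.pyGetD accum l 0 ≤ 0 then false
        else checkWhile accum N (l + 1) (r + 1) fuel
      else true

def check (a : List Int) (k : Int) : Bool :=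
  let N : Int := a.length
  let accum : List Int :=
    (PySem.List.enumerate a 0).foldl
      (fun acc p => PySem.List.pySetD acc (p.1 + 1) (p.2 + PySem.List.pyGetD acc p.1 0))
      (List.replicate (a.length + 1) 0)
  checkWhile accum N 0 k (a.length + 2)

-- ===== PORT B =====
def altLoop (a : List Int) (k : Int) : List Int → Int → Bool
  | [], _ => true
  | r :: rs, s =>
      let s' := s + PySem.List.pyGetD a r 0 - PySem.List.pyGetD a (r - k) 0
      if s' ≤ 0 then false else altLoop a k rs s'

def check_alt (a : List Int) (k : Int) : Bool :=
  let N : Int := a.length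
  if k > N then true
  else
    let s := (PySem.List.slice a none (some k)).sum
    if s ≤ 0 then false
    else altLoop a k (PySem.List.pyRange k N 1) s

-- ===== PRECONDITION & SPEC =====
-- Pre_ restricts to the natural domain of a window length: k ≥ 0. For negative k A raises
-- IndexError (k < -(N+1)) or returns a value via Python's negative-index wraparound into the
-- prefix-sum array, an accident of A's implementation on malformed input; B's sliding window
-- raises IndexError on many such inputs.
def Pre_check (a : List Int) (k : Int) : Prop := 0 ≤ k
instance (a : List Int) (k : Int) : Decidable (Pre_check a k) := by unfold Pre_check; infer_instance
def pvWitness_check : List Int × Int := ([1, 2, -3], 2)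

def Spec_check (a : List Int) (k : Int) (out : Bool) : Prop := out = check_alt a k
instance (a : List Int) (k : Int) (out : Bool) : Decidable (Spec_check a k out) := by unfold Spec_check; infer_instance

-- ===== CLAIM (what is proved, stated in full; the proofs are below) =====
def Claim_equal_check : Prop := ∀ (a : List Int) (k : Int), Dom_check a k → Pre_check a k → Spec_check a k (check a k)

-- ===== LEMMAS AND PROOFS =====

-- prefix sum of the first i elements
def pre (a : List Int) (i : Nat) : Int := (a.take i).sum

-- Nat-indexed version of A's accumulation loop
def buildN : List Int → Nat → List Int → List Int
  | [], _, acc => acc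
  | x :: xs, s, acc => buildN xs (s + 1) (acc.set (s + 1) (x + acc.getD s 0))

lemma build_eq_buildN : ∀ (xs : List Int) (s : Nat) (acc : List Int),
    (PySem.List.enumerate xs (s : Int)).foldl
      (fun acc p => PySem.List.pySetD acc (p.1 + 1) (p.2 + PySem.List.pyGetD acc p.1 0)) acc
    = buildN xs s acc := by
  intro xs
  induction xs with
  | nil => intro s acc; simp [PySem.List.enumerate_nil, buildN]
  | cons x xs ih =>
      intro s acc
      rw [PySem.List.enumerate_cons]
      simp only [List.foldl_cons]
      have h1 : ((s : Int) + 1) = ((s + 1 : Nat) : Int) := by push_cast; ring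
      have h2 : PySem.List.pySetD acc ((s : Int) + 1) (x + PySem.List.pyGetD acc (s : Int) 0)
          = acc.set (s + 1) (x + acc.getD s 0) := by
        rw [h1, PySem.List.pySetD_natCast]
        simp [List.getD]
      rw [h2, h1, ih (s + 1)]
      rfl

lemma buildN_length : ∀ (xs : List Int) (s : Nat) (acc : List Int),
    (buildN xs s acc).length = acc.length := by
  intro xs
  induction xs with
  | nil => intro s acc; simp [buildN]
  | cons x xs ih => intro s acc; simp [buildN, ih]

lemma buildN_getD (xs : List Int) : ∀ (s : Nat) (acc : List Int),
    s + xs.length < acc.length →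
    ∀ j : Nat, (buildN xs s acc).getD j 0 =
      if s < j ∧ j ≤ s + xs.length then (xs.take (j - s)).sum + acc.getD s 0
      else acc.getD j 0 := by
  induction xs with
  | nil =>
      intro s acc h j
      simp only [buildN, List.length_nil, Nat.add_zero, List.take_nil, List.sum_nil, Int.zero_add]
      by_cases hj : s < j ∧ j ≤ s
      · omega
      · rw [if_neg hj]
  | cons x xs ih =>
      intro s acc h j
      simp only [List.length_cons] at h ⊢
      have hset : buildN (x :: xs) s acc = buildN xs (s + 1) (acc.set (s + 1) (x + acc.getD s 0)) := rfl
      have hlen : (acc.set (s + 1) (x + acc.getD s 0)).length = acc.length := by simp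
      have hs1 : s + 1 < acc.length := by omega
      rw [hset, ih (s + 1) _ (by rw [hlen]; omega) j]
      have hself : (acc.set (s + 1) (x + acc.getD s 0)).getD (s + 1) 0 = x + acc.getD s 0 := by
        simp [List.getD, List.getElem?_set, hs1]
      have hne : ∀ m : Nat, m ≠ s + 1 → (acc.set (s + 1) (x + acc.getD s 0)).getD m 0 = acc.getD m 0 := by
        intro m hm
        simp only [List.getD, List.getElem?_set]
        rw [if_neg (by omega : ¬ s + 1 = m)]
      by_cases h1 : s + 1 < j ∧ j ≤ s + 1 + xs.length
      · rw [if_pos h1, if_pos (by omega : s < j ∧ j ≤ s + (xs.length + 1)), hself]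
        have htake : (x :: xs).take (j - s) = x :: xs.take (j - (s + 1)) := by
          rw [(by omega : j - s = (j - (s + 1)) + 1), List.take_succ_cons]
        rw [htake, List.sum_cons]
        ring
      · rw [if_neg h1]
        by_cases h2 : j = s + 1
        · subst h2
          rw [hself, if_pos (by omega : s < s + 1 ∧ s + 1 ≤ s + (xs.length + 1))]
          simp [(by omega : s + 1 - s = 1), List.take_succ_cons, pre]
        · rw [hne j h2, if_neg (by omega : ¬ (s < j ∧ j ≤ s + (xs.length + 1)))]

-- accum[j] = pre a j for j ≤ N
lemma accum_getD (a : List Int) (j : Nat) (hj : j ≤ a.length) :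
    (buildN a 0 (List.replicate (a.length + 1) 0)).getD j 0 = pre a j := by
  have hrep : ∀ m : Nat, (List.replicate (a.length + 1) (0 : Int)).getD m 0 = 0 := by
    intro m
    simp only [List.getD, List.getElem?_replicate]
    split <;> rfl
  rw [buildN_getD a 0 _ (by simp) j]
  by_cases h0 : 0 < j ∧ j ≤ 0 + a.length
  · rw [if_pos h0, hrep 0]
    simp [pre]
  · rw [if_neg h0, hrep j]
    have hj0 : j = 0 := by omega
    subst hj0
    simp [pre]

lemma pre_succ (a : List Int) (i : Nat) (hi : i < a.length) :
    pre a (i + 1) = pre a i + a[i] := by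
  unfold pre
  exact List.sum_take_succ a i hi

lemma accum_pyGetD (a : List Int) (i : Int) (h0 : 0 ≤ i) (hN : i ≤ (a.length : Int)) :
    PySem.List.pyGetD (buildN a 0 (List.replicate (a.length + 1) 0)) i 0 = pre a i.toNat := by
  have hlen : (buildN a 0 (List.replicate (a.length + 1) 0)).length = a.length + 1 := by
    rw [buildN_length]; simp
  have hi : i < ((buildN a 0 (List.replicate (a.length + 1) 0)).length : Int) := by
    rw [hlen]; push_cast; omega
  rw [PySem.List.pyGetD_eq_getElem _ _ h0 hi]
  have h2 : i.toNat < (buildN a 0 (List.replicate (a.length + 1) 0)).length := by omega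
  have h3 := accum_getD a i.toNat (by omega)
  rw [List.getD_eq_getElem _ _ h2] at h3
  exact h3

lemma elem_pyGetD (a : List Int) (i : Int) (h0 : 0 ≤ i) (hN : i < (a.length : Int)) :
    pre a (i.toNat + 1) = pre a i.toNat + PySem.List.pyGetD a i 0 := by
  rw [PySem.List.pyGetD_eq_getElem _ _ h0 hN, pre_succ a i.toNat (by omega)]

lemma checkWhile_past (accum : List Int) (N : Int) (l r : Int) (h : N < r) :
    ∀ fuel, checkWhile accum N l r fuel = true := by
  intro fuel
  cases fuel with
  | zero => rfl
  | succ f => simp only [checkWhile, if_neg (by omega : ¬ r ≤ N)]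

lemma loop_eq (a : List Int) (k : Int) (hk : 0 ≤ k) :
    ∀ (fuel : Nat) (l : Int), 0 ≤ l → l + k ≤ (a.length : Int) →
    ((a.length : Int) - (l + k)).toNat < fuel →
    checkWhile (buildN a 0 (List.replicate (a.length + 1) 0)) (a.length : Int) l (l + k) fuel =
      (if pre a (l + k).toNat - pre a l.toNat ≤ 0 then false
       else altLoop a k (PySem.List.pyRange (l + k) (a.length : Int) 1)
              (pre a (l + k).toNat - pre a l.toNat)) := by
  intro fuel
  induction fuel with
  | zero => intro l _ _ hf; omega
  | succ fuel ih =>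
      intro l hl hlk hf
      rw [checkWhile, if_pos hlk,
          accum_pyGetD a (l + k) (by omega) hlk, accum_pyGetD a l hl (by omega)]
      by_cases hle : pre a (l + k).toNat - pre a l.toNat ≤ 0
      · rw [if_pos hle, if_pos hle]
      · rw [if_neg hle, if_neg hle]
        by_cases hend : (a.length : Int) ≤ l + k
        · rw [checkWhile_past _ _ _ _ (by omega) fuel]
          have hnil : PySem.List.pyRange (l + k) (a.length : Int) 1 = [] := by
            rw [PySem.List.pyRange_one, (by omega : ((a.length : Int) - (l + k)).toNat = 0)]
            simp
          rw [hnil]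
          rfl
        · have hlt : l + k < (a.length : Int) := by omega
          rw [PySem.List.pyRange_one_cons hlt]
          simp only [altLoop]
          rw [(by ring : l + k - k = l)]
          have har := elem_pyGetD a (l + k) (by omega) hlt
          have hal := elem_pyGetD a l hl (by omega)
          have hs' : pre a (l + k).toNat - pre a l.toNat + PySem.List.pyGetD a (l + k) 0
              - PySem.List.pyGetD a l 0 = pre a (l + 1 + k).toNat - pre a (l + 1).toNat := by
            rw [(by omega : (l + 1 + k).toNat = (l + k).toNat + 1),
                (by omega : (l + 1).toNat = l.toNat + 1), har, hal]
            ring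
          rw [hs', (by ring : l + k + 1 = l + 1 + k)]
          exact ih (l + 1) (by omega) (by omega) (by omega)

-- ===== VERDICT (by name: the statement is the Claim_ definition above) =====
lemma build_eq_buildN0 (a : List Int) (acc : List Int) :
    (PySem.List.enumerate a (0 : Int)).foldl
      (fun acc p => PySem.List.pySetD acc (p.1 + 1) (p.2 + PySem.List.pyGetD acc p.1 0)) acc
    = buildN a 0 acc := build_eq_buildN a 0 acc

theorem check_spec : Claim_equal_check := by
  intro a k _ hpre
  have hk : (0 : Int) ≤ k := hpre
  show check a k = check_alt a k
  simp only [check, check_alt, build_eq_buildN0]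
  by_cases hbig : (a.length : Int) < k
  · rw [if_pos hbig]
    exact checkWhile_past _ _ 0 k hbig _
  · rw [if_neg hbig]
    have hloop := loop_eq a k hk (a.length + 2) 0 le_rfl (by omega) (by omega)
    rw [zero_add] at hloop
    have hpre0 : pre a (0 : Int).toNat = 0 := rfl
    rw [hpre0, sub_zero] at hloop
    rw [hloop, PySem.List.slice_to _ hk]
    rfl
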